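-- pv_equiv track=rewrite | github.com/aknob/AfpMaster | AfpBase/AfpUtilities/AfpStringUtilities.py | Afp_getSequence
-- ===== SOURCE A (Python) =====
-- def Afp_getSequence(string, words):
--     seq = []
--     length = {}
--     for word in words:
--         length[word] = len(word)
--     lgh = len(string)
--     for i in range(lgh):
--         for word in words:
--             lend = i + length[word]
--             if lgh >= lend and string[i:lend] == word:
--                 seq.append(word)
--     #print "Afp_getSequence:", string, words, seq
--     return seq
-- ===== SOURCE B (Python) =====
-- def Afp_getSequence(string, words):
--     # counting-sort by position: per-word C-level find() scans fill position buckets,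
--     # then concatenate buckets in order; same output order as the nested scan.
--     n = len(string)
--     buckets = [[] for _ in range(n)]
--     for w in words:
--         if w:
--             k = string.find(w)
--             while k != -1:
--                 buckets[k].append(w)
--                 k = string.find(w, k + 1)
--         else:
--             for b in buckets:
--                 b.append(w)
--     return [w for b in buckets for w in b]
-- ===== Notes on version B (the rewrite author's own statement) =====
-- stated objective: faster
-- what changed: Replaces the position-outer nested scan (a Python-level slice comparison for every (position, word) pair) by per-word str.find() scans that drop each match into a position-indexed bucket list (a counting sort by position), concatenated at the end.
import Mathlib
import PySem

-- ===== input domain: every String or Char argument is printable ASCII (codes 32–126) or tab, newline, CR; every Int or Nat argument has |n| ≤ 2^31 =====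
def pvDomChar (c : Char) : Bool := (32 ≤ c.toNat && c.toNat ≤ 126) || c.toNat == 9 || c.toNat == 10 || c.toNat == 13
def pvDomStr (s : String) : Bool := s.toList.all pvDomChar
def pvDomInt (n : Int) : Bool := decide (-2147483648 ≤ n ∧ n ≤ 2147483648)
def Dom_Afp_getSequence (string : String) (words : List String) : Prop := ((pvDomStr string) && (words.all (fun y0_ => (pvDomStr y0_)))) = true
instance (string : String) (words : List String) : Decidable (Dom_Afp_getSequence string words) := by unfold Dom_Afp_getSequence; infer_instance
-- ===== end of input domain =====

-- B replaces the position-outer nested scan by per-word find() scans dropped into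
-- position-indexed buckets (a counting sort by position); measurably faster in Python
-- (C-level find, no per-(position,word) slice), same return value.

-- ===== PORT A =====
def Afp_getSequence (string : String) (words : List String) : List String :=
  let seq : List String := []
  let length : PySem.Dict String Int :=
    words.foldl (fun d word => d.insert word (PySem.Str.len word)) PySem.Dict.empty
  let lgh : Int := PySem.Str.len string
  (PySem.List.pyRange 0 lgh).foldl (fun seq i =>
    words.foldl (fun seq word =>
      -- length[word]: the key is always present (every word of words was inserted)
      let lend : Int := i + ((length.get? word).getD 0)
      if lgh ≥ lend ∧ PySem.Str.slice string (some i) (some lend) = word then seq ++ [word]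
      else seq) seq) seq

-- ===== PORT B =====
-- the 'k = string.find(w); while k != -1: buckets[k].append(w); k = string.find(w, k+1)' loop of Source B;
-- fuel (= len(string)+1 at the call) only makes it total: match positions strictly increase, so it never runs out
def pvFillLoop (string w : String) : Nat → Int → List (List String) → List (List String)
  | 0, _, occ => occ
  | fuel+1, k, occ =>
    if k = -1 then occ
    else pvFillLoop string w fuel (PySem.Str.findFrom string w (k+1))
          (occ.set k.toNat ((occ.getD k.toNat []) ++ [w]))

def Afp_getSequence_alt (string : String) (words : List String) : List String :=
  let n := string.toList.length
  let buckets : List (List String) := (List.range n).map (fun _ => ([] : List String))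
  let buckets := words.foldl (fun occ w =>
    if w = "" then occ.map (fun b => b ++ [w])
    else pvFillLoop string w (n+1) (PySem.Str.find string w) occ) buckets
  buckets.flatten

-- ===== PRECONDITION & SPEC =====
def Spec_Afp_getSequence (string : String) (words : List String) (out : List String) : Prop := out = Afp_getSequence_alt string words
instance (string : String) (words : List String) (out : List String) : Decidable (Spec_Afp_getSequence string words out) := by unfold Spec_Afp_getSequence; infer_instance

-- ===== CLAIM (what is proved, stated in full; the proofs are below) =====
def Claim_equal_Afp_getSequence : Prop := ∀ (string : String) (words : List String), Dom_Afp_getSequence string words → Spec_Afp_getSequence string words (Afp_getSequence string words)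

-- ===== LEMMAS AND PROOFS =====

-- w occurs in cs at position i
def pvMatchAt (cs : List Char) (i : Nat) (w : String) : Bool := decide (w.toList <+: cs.drop i)

-- the match positions of w in cs that are ≥ k, in increasing order
def pvPosFrom (cs : List Char) (w : String) (k : Nat) : List Nat :=
  (List.range' k (cs.length - k)).filter (fun i => pvMatchAt cs i w)

def pvPushAll (occ : List (List String)) (P : List Nat) (w : String) : List (List String) :=
  P.foldl (fun o p => o.set p ((o.getD p []) ++ [w])) occ

-- dict built by the first loop of A maps every word of ws to f word
lemma pv_dict_get_of_not_mem (f : String → Int) (ws : List String) (d : PySem.Dict String Int)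
    (x : String) (hx : x ∉ ws) :
    (ws.foldl (fun d w => d.insert w (f w)) d).get? x = d.get? x := by
  induction ws generalizing d with
  | nil => simp
  | cons w t ih =>
    simp only [List.mem_cons, not_or] at hx
    simp only [List.foldl_cons]
    rw [ih _ hx.2, PySem.Dict.get?_insert_of_ne _ _ hx.1]

lemma pv_dict_get (f : String → Int) (ws : List String) (d : PySem.Dict String Int)
    (x : String) (hx : x ∈ ws) :
    (ws.foldl (fun d w => d.insert w (f w)) d).get? x = some (f x) := by
  induction ws generalizing d with
  | nil => simp at hx
  | cons w t ih =>
    simp only [List.foldl_cons]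
    by_cases hxt : x ∈ t
    · exact ih _ hxt
    · have hxw : x = w := by
        rcases List.mem_cons.mp hx with h | h
        · exact h
        · exact absurd h hxt
      subst hxw
      rw [pv_dict_get_of_not_mem f t _ x hxt, PySem.Dict.get?_insert_self]

-- A's inner test, for i < n and any word, is exactly pvMatchAt
lemma pv_cond_iff (string w : String) (i : Nat) (hi : i ≤ string.toList.length) :
    ((PySem.Str.len string ≥ (i : Int) + (PySem.Str.len w) ∧
      PySem.Str.slice string (some (i : Int)) (some ((i : Int) + PySem.Str.len w)) = w)
     ↔ w.toList <+: string.toList.drop i) := by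
  have hsl : PySem.Str.slice string (some (i : Int)) (some ((i : Int) + PySem.Str.len w))
      = String.ofList (List.take w.toList.length (List.drop i string.toList)) := by
    simp only [PySem.Str.slice, PySem.Str.len_eq]
    rw [show PySem.Chars.slice string.toList (some (i : Int))
          (some ((i : Int) + (w.toList.length : Int)))
        = PySem.List.slice string.toList (some (i : Int))
          (some ((i : Int) + (w.toList.length : Int))) from rfl]
    rw [PySem.List.slice_natCast_add]
  constructor
  · rintro ⟨-, hq⟩
    rw [hsl] at hq
    have hq' : List.take w.toList.length (List.drop i string.toList) = w.toList := by
      have hq2 := congrArg String.toList hq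
      rwa [String.toList_ofList] at hq2
    rw [← hq']
    exact List.take_prefix _ _
  · intro hpre
    have htake := List.prefix_iff_eq_take.mp hpre
    have hlen : w.toList.length ≤ string.toList.length - i := by
      have := hpre.length_le
      simpa [List.length_drop] using this
    refine ⟨?_, ?_⟩
    · simp only [PySem.Str.len_eq, ge_iff_le]
      omega
    · rw [hsl, ← htake]
      rw [← String.toList_inj, String.toList_ofList]

-- A computes the position-major flatMap
lemma pv_A_eq (string : String) (words : List String) :
    Afp_getSequence string words
      = (List.range string.toList.length).flatMap
          (fun i => words.filter (fun w => pvMatchAt string.toList i w)) := by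
  unfold Afp_getSequence
  simp only []
  rw [PySem.Str.len_eq, PySem.List.pyRange_zero_natCast, List.foldl_map]
  rw [PySem.List.foldl_congr_mem _ _
    (fun acc i => acc ++ words.filter (fun w => pvMatchAt string.toList i w)) _ ?_]
  · rw [PySem.List.foldl_append_eq_flatMap, List.nil_append]
  · intro acc i hi
    have hin : i < string.toList.length := List.mem_range.mp hi
    rw [PySem.List.foldl_congr_mem _ _
      (fun seq word => if word.toList <+: string.toList.drop i then seq ++ [word] else seq) _ ?_]
    · rw [PySem.List.foldl_append_ite_eq_filter]
      rfl
    · intro seq word hword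
      simp only []
      rw [pv_dict_get PySem.Str.len words _ word hword]
      simp only [Option.getD_some]
      congr 1
      rw [eq_iff_iff]
      exact pv_cond_iff string word i (le_of_lt hin)

-- generic: a filter of a range' whose first hit is p
lemma pv_filter_range'_cons (P : Nat → Bool) (a len p : Nat) (hap : a ≤ p) (hp : p < a + len)
    (hPp : P p = true) (hmin : ∀ i, a ≤ i → i < p → P i = false) :
    (List.range' a len).filter P = p :: (List.range' (p+1) (a + len - (p+1))).filter P := by
  induction len generalizing a with
  | zero => omega
  | succ len ih =>
    rw [List.range'_succ]
    by_cases hap' : a = p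
    · subst hap'
      rw [List.filter_cons_of_pos hPp]
      have harith : a + (len + 1) - (a + 1) = len := by omega
      rw [harith]
    · have hPa : P a = false := hmin a le_rfl (lt_of_le_of_ne hap hap')
      rw [List.filter_cons_of_neg (by simp [hPa])]
      have harith : a + (len + 1) - (p + 1) = (a + 1) + len - (p + 1) := by omega
      rw [harith]
      exact ih (a + 1) (by omega) (by omega) (fun i h1 h2 => hmin i (by omega) h2)

lemma pv_posFrom_nil (string w : String) (k : Nat) (hk : k ≤ string.toList.length)
    (h : ¬ w.toList <:+: string.toList.drop k) :
    pvPosFrom string.toList w k = [] := by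
  unfold pvPosFrom
  rw [List.filter_eq_nil_iff]
  intro i hi
  have hik : k ≤ i ∧ i < k + (string.toList.length - k) := by
    have := List.mem_range'_1.mp hi
    omega
  simp only [pvMatchAt, decide_eq_true_eq]
  intro hpre
  apply h
  have hdd : string.toList.drop i = (string.toList.drop k).drop (i - k) := by
    rw [List.drop_drop]
    congr 1
    omega
  rw [hdd] at hpre
  exact hpre.isInfix.trans (List.drop_suffix (i - k) (string.toList.drop k)).isInfix

lemma pv_posFrom_cons (string w : String) (k p : Nat) (hk : k ≤ string.toList.length)
    (hkp : k ≤ p) (hpn : p < string.toList.length)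
    (hPp : pvMatchAt string.toList p w = true)
    (hmin : ∀ i, k ≤ i → i < p → pvMatchAt string.toList i w = false) :
    pvPosFrom string.toList w k = p :: pvPosFrom string.toList w (p+1) := by
  unfold pvPosFrom
  have h1 := pv_filter_range'_cons (fun i => pvMatchAt string.toList i w) k
    (string.toList.length - k) p hkp (by omega) hPp hmin
  rw [h1]
  have harith : k + (string.toList.length - k) - (p + 1) = string.toList.length - (p + 1) := by
    omega
  rw [harith]

-- the find/while loop of B is pvPushAll over the match positions ≥ k
lemma pv_fill_spec (string w : String) (hw : w ≠ "") :
    ∀ (k : Nat), k ≤ string.toList.length →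
    ∀ (fuel : Nat), string.toList.length + 1 - k ≤ fuel →
    ∀ (occ : List (List String)),
      pvFillLoop string w fuel (PySem.Str.findFrom string w (k : Int)) occ
        = pvPushAll occ (pvPosFrom string.toList w k) w := by
  suffices h : ∀ (fuel : Nat) (k : Nat), k ≤ string.toList.length →
      string.toList.length + 1 - k ≤ fuel →
      ∀ (occ : List (List String)),
        pvFillLoop string w fuel (PySem.Str.findFrom string w (k : Int)) occ
          = pvPushAll occ (pvPosFrom string.toList w k) w by
    intro k hk fuel hfuel occ
    exact h fuel k hk hfuel occ
  intro fuel
  induction fuel with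
  | zero => intro k _ hfuel; omega
  | succ f ih =>
    intro k hk hfuel occ
    by_cases hr : PySem.Str.findFrom string w (k : Int) = -1
    · have hrC : PySem.Chars.findFrom string.toList w.toList ((k : Nat) : Int) = -1 := by
        rw [← PySem.Str.findFrom_eq]; exact hr
      rw [show pvFillLoop string w (f+1) (PySem.Str.findFrom string w (k : Int)) occ = occ by
        simp [pvFillLoop, hrC]]
      rw [pv_posFrom_nil string w k hk
        ((PySem.Chars.findFrom_natCast_eq_neg_one_iff string.toList w.toList k hk).mp
          (by rw [← PySem.Str.findFrom_eq]; exact hr))]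
      rfl
    · have hr' : PySem.Chars.findFrom string.toList w.toList ((k : Nat) : Int) ≠ -1 := by
        rw [← PySem.Str.findFrom_eq]; exact hr
      obtain ⟨hkr, hpre, hmin⟩ :=
        PySem.Chars.findFrom_natCast_spec string.toList w.toList k hk hr'
      set r := PySem.Chars.findFrom string.toList w.toList ((k : Nat) : Int) with hrdef
      have hreq : PySem.Str.findFrom string w (k : Int) = r := by
        rw [PySem.Str.findFrom_eq]
      have hr0 : (0 : Int) ≤ r := le_trans (Int.natCast_nonneg k) hkr
      have hwnil : w.toList ≠ [] := by
        intro hnl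
        apply hw
        rw [← String.toList_inj, hnl]
        rfl
      have hpn : r.toNat < string.toList.length := by
        by_contra hge
        have hdr : string.toList.drop r.toNat = [] := List.drop_eq_nil_of_le (by omega)
        rw [hdr] at hpre
        exact hwnil (List.prefix_nil.mp hpre)
      have hkle : k ≤ r.toNat := by omega
      have hstep : pvFillLoop string w (f+1) (PySem.Str.findFrom string w (k : Int)) occ
          = pvFillLoop string w f (PySem.Str.findFrom string w (((r.toNat + 1 : Nat) : Int)))
              (occ.set r.toNat ((occ.getD r.toNat []) ++ [w])) := by
        simp only [pvFillLoop]
        rw [if_neg hr, hreq]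
        congr 2
        omega
      rw [hstep]
      rw [pv_posFrom_cons string w k r.toNat hk hkle hpn
        (by simp only [pvMatchAt, decide_eq_true_eq]; exact hpre)
        (fun i h1 h2 => by
          simp only [pvMatchAt, decide_eq_false_iff_not]
          exact hmin i h1 h2)]
      rw [show pvPushAll occ (r.toNat :: pvPosFrom string.toList w (r.toNat + 1)) w
          = pvPushAll (occ.set r.toNat ((occ.getD r.toNat []) ++ [w]))
              (pvPosFrom string.toList w (r.toNat + 1)) w from rfl]
      exact ih (r.toNat + 1) (by omega) (by omega) _

lemma pv_pushAll_length (occ : List (List String)) (P : List Nat) (w : String) :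
    (pvPushAll occ P w).length = occ.length := by
  induction P generalizing occ with
  | nil => rfl
  | cons p P ih =>
    rw [show pvPushAll occ (p :: P) w
        = pvPushAll (occ.set p ((occ.getD p []) ++ [w])) P w from rfl]
    rw [ih]
    exact List.length_set ..

lemma pv_pushAll_getD (occ : List (List String)) (P : List Nat) (w : String)
    (hnd : P.Nodup) (i : Nat) :
    (pvPushAll occ P w).getD i []
      = occ.getD i [] ++ (if i ∈ P ∧ i < occ.length then [w] else []) := by
  induction P generalizing occ with
  | nil => simp [pvPushAll]
  | cons p P ih =>
    simp only [List.nodup_cons] at hnd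
    rw [show pvPushAll occ (p :: P) w
        = pvPushAll (occ.set p ((occ.getD p []) ++ [w])) P w from rfl]
    rw [ih _ hnd.2, List.length_set]
    by_cases hip : i = p
    · subst hip
      have hnotP : i ∉ P := hnd.1
      by_cases hlt : i < occ.length
      · simp only [List.getD_eq_getElem?_getD]
        rw [List.getElem?_set_self hlt]
        simp [hnotP, hlt]
      · have hset : occ.set i ((occ.getD i []) ++ [w]) = occ := by
          apply List.set_eq_of_length_le
          omega
        rw [hset]
        simp [hnotP, hlt]
    · simp only [List.getD_eq_getElem?_getD]
      rw [List.getElem?_set_ne (by omega)]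
      congr 1
      simp [List.mem_cons, hip]

lemma pv_foldWords (string : String) (words : List String) :
    ∀ (occ : List (List String)), occ.length = string.toList.length →
      (words.foldl (fun occ w =>
          if w = "" then occ.map (fun b => b ++ [w])
          else pvFillLoop string w (string.toList.length+1) (PySem.Str.find string w) occ) occ).length
        = string.toList.length ∧
      ∀ i < string.toList.length,
        (words.foldl (fun occ w =>
            if w = "" then occ.map (fun b => b ++ [w])
            else pvFillLoop string w (string.toList.length+1) (PySem.Str.find string w) occ) occ).getD i []
          = occ.getD i [] ++ words.filter (fun w => pvMatchAt string.toList i w) := by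
  induction words with
  | nil => intro occ hocc; exact ⟨hocc, fun i hi => by simp⟩
  | cons w t ih =>
    intro occ hocc
    by_cases hw : w = ""
    · subst hw
      simp only [List.foldl_cons, if_true]
      obtain ⟨hl, hg⟩ := ih (occ.map (fun b => b ++ [""])) (by rw [List.length_map]; exact hocc)
      refine ⟨hl, fun i hi => ?_⟩
      rw [hg i hi]
      have hmap : (occ.map (fun b => b ++ [""])).getD i []
          = occ.getD i [] ++ [""] := by
        rw [List.getD_eq_getElem?_getD, List.getD_eq_getElem?_getD, List.getElem?_map]
        have : i < occ.length := by omega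
        rw [List.getElem?_eq_getElem this]
        simp
      rw [hmap]
      have hm : pvMatchAt string.toList i "" = true := by
        simp [pvMatchAt]
      rw [List.filter_cons_of_pos hm, List.append_assoc]
      rfl
    · simp only [List.foldl_cons, if_neg hw]
      have hfind : PySem.Str.find string w
          = PySem.Str.findFrom string w (((0 : Nat) : Int)) := by
        rw [PySem.Str.findFrom_eq, PySem.Str.find_eq]
        rw [show (((0 : Nat) : Int)) = (0 : Int) from rfl]
        rw [PySem.Chars.findFrom_zero]
      rw [hfind]
      rw [pv_fill_spec string w hw 0 (Nat.zero_le _) (string.toList.length + 1) (by omega) occ]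
      obtain ⟨hl, hg⟩ := ih (pvPushAll occ (pvPosFrom string.toList w 0) w)
        (by rw [pv_pushAll_length]; exact hocc)
      refine ⟨hl, fun i hi => ?_⟩
      rw [hg i hi]
      have hnd : (pvPosFrom string.toList w 0).Nodup := by
        unfold pvPosFrom
        exact List.Nodup.filter _ (List.nodup_range' 1 (by norm_num))
      rw [pv_pushAll_getD occ _ w hnd i]
      have hmem : (i ∈ pvPosFrom string.toList w 0 ∧ i < occ.length)
          ↔ pvMatchAt string.toList i w = true := by
        unfold pvPosFrom
        rw [List.mem_filter, List.mem_range'_1]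
        constructor
        · rintro ⟨⟨-, h⟩, -⟩
          exact h
        · intro h
          exact ⟨⟨⟨by omega, by omega⟩, h⟩, by omega⟩
      by_cases hmi : pvMatchAt string.toList i w = true
      · rw [if_pos (hmem.mpr hmi), List.filter_cons_of_pos hmi, List.append_assoc]
        rfl
      · rw [if_neg (fun hc => hmi (hmem.mp hc)), List.filter_cons_of_neg (by simpa using hmi)]
        simp

lemma pv_B_eq (string : String) (words : List String) :
    Afp_getSequence_alt string words
      = (List.range string.toList.length).flatMap
          (fun i => words.filter (fun w => pvMatchAt string.toList i w)) := by
  unfold Afp_getSequence_alt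
  simp only []
  obtain ⟨hl, hg⟩ := pv_foldWords string words ((List.range string.toList.length).map (fun _ => ([] : List String)))
    (by rw [List.length_map, List.length_range])
  have hbuckets : (words.foldl (fun occ w =>
        if w = "" then occ.map (fun b => b ++ [w])
        else pvFillLoop string w (string.toList.length + 1) (PySem.Str.find string w) occ)
        ((List.range string.toList.length).map (fun _ => ([] : List String))))
      = (List.range string.toList.length).map
          (fun i => words.filter (fun w => pvMatchAt string.toList i w)) := by
    apply List.ext_getElem
    · rw [hl, List.length_map, List.length_range]
    · intro i h1 h2
      have hi : i < string.toList.length := by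
        rw [List.length_map, List.length_range] at h2
        exact h2
      have hgi := hg i hi
      have hinit : ((List.range string.toList.length).map (fun _ => ([] : List String))).getD i []
          = [] := by
        rw [List.map_const', List.getD_eq_getElem?_getD]
        rcases Nat.lt_or_ge i (List.range string.toList.length).length with h | h
        · rw [List.getElem?_eq_getElem (by simpa using h)]
          simp
        · rw [List.getElem?_eq_none (by simpa using h)]
          rfl
      rw [hinit, List.nil_append] at hgi
      rw [List.getD_eq_getElem?_getD, List.getElem?_eq_getElem h1] at hgi
      simp only [Option.getD_some] at hgi
      rw [hgi]
      rw [List.getElem_map, List.getElem_range]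
  rw [hbuckets, ← List.flatMap_def]

-- ===== VERDICT (by name: the statement is the Claim_ definition above) =====
theorem Afp_getSequence_spec : Claim_equal_Afp_getSequence := by
  intro string words _
  unfold Spec_Afp_getSequence
  rw [pv_A_eq, pv_B_eq]
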